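-- pv_equiv track=rewrite | github.com/SuhaniSharma15tech/EduMetrics | backend/analysis_engine/flagging.py | _weeks_until_next_exam
-- ===== SOURCE A (Python) =====
-- MIDTERM_WEEK = 8
--
-- ENDTERM_WEEK = 18
--
-- EXAM_WEEKS   = {MIDTERM_WEEK, ENDTERM_WEEK}
--
-- WEEKS_DENOM_CAP = 6
--
-- def _weeks_until_next_exam(sem_week):
--     """
--     Teaching weeks (non-exam) between current week (exclusive)
--     and the next exam week (exclusive).
--     Capped at WEEKS_DENOM_CAP so early-semester scores aren't suppressed.
--     """
--     if sem_week < MIDTERM_WEEK: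
--         boundary = MIDTERM_WEEK
--     elif sem_week < ENDTERM_WEEK:
--         boundary = ENDTERM_WEEK
--     else:
--         boundary = ENDTERM_WEEK + 1   # past endterm — treat as 1 week away
--
--     count = sum(
--         1 for w in range(sem_week + 1, boundary)
--         if w not in EXAM_WEEKS
--     )
--     return max(1, min(count, WEEKS_DENOM_CAP))   # clamp to [1, cap]
-- ===== SOURCE B (Python) =====
-- MIDTERM_WEEK = 8
-- ENDTERM_WEEK = 18
-- WEEKS_DENOM_CAP = 6
--
-- def _weeks_until_next_exam(sem_week):
--     """Pick the nearest exam boundary strictly after the current week from a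
--     candidate list, then clamp the arithmetic gap to [1, cap]."""
--     candidates = [MIDTERM_WEEK, ENDTERM_WEEK, ENDTERM_WEEK + 1]
--     nxt = min((b for b in candidates if b > sem_week), default=sem_week + 1)
--     gap = nxt - sem_week - 1
--     return max(1, min(gap, WEEKS_DENOM_CAP))
-- ===== Notes on version B (the rewrite author's own statement) =====
-- stated objective: simpler
-- what changed: Instead of selecting a boundary with an if-chain and counting non-exam weeks with a generator-sum over range(), B takes the minimum candidate boundary strictly after the current week from a literal list and returns the clamped arithmetic gap; the exam-week filter in A can never fire on any reachable range, so the gap equals A's count.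
import Mathlib
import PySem

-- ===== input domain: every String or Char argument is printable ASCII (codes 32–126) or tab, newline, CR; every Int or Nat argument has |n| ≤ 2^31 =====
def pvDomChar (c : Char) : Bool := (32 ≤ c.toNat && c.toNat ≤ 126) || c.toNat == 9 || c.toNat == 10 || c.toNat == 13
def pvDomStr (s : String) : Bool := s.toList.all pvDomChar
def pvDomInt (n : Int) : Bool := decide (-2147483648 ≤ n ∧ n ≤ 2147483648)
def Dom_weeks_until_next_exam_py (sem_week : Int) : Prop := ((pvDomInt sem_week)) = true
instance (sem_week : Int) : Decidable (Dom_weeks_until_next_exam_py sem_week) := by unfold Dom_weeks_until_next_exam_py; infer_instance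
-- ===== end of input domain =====

-- B drops A's if-chain + generator-sum loop: it takes min(candidate boundaries > sem_week, default) and clamps the arithmetic gap (objective: simpler).
-- ===== PORT A =====
def weeks_until_next_exam_py (sem_week : Int) : Int :=
  let boundary : Int :=
    if sem_week < 8 then 8
    else if sem_week < 18 then 18
    else 18 + 1
  let count : Int := (PySem.List.pyRange (sem_week + 1) boundary 1).foldl
    (fun acc w => if ¬ (w = 8 ∨ w = 18) then acc + 1 else acc) 0
  max 1 (min count 6)

-- ===== PORT B =====
def weeks_until_next_exam_py_alt (sem_week : Int) : Int :=
  let candidates : List Int := [8, 18, 18 + 1]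
  let nxt : Int :=
    (PySem.List.min? (candidates.filter (fun b => decide (sem_week < b))) (fun x => x)).getD
      (sem_week + 1)
  let gap : Int := nxt - sem_week - 1
  max 1 (min gap 6)

-- ===== PRECONDITION & SPEC =====
def Spec_weeks_until_next_exam_py (sem_week : Int) (out : Int) : Prop := out = weeks_until_next_exam_py_alt sem_week
instance (sem_week : Int) (out : Int) : Decidable (Spec_weeks_until_next_exam_py sem_week out) := by unfold Spec_weeks_until_next_exam_py; infer_instance

-- ===== CLAIM =====
def Claim_equal_weeks_until_next_exam_py : Prop := ∀ (sem_week : Int), Dom_weeks_until_next_exam_py sem_week → Spec_weeks_until_next_exam_py sem_week (weeks_until_next_exam_py sem_week)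

-- ===== LEMMAS AND PROOFS =====

theorem pv_foldl_count_const (l : List Int) (init : Int) :
    l.foldl (fun acc (_ : Int) => acc + 1) init = init + l.length := by
  induction l generalizing init with
  | nil => simp
  | cons x xs ih => simp [List.foldl, ih]; ring

theorem pv_count_all (a b : Int)
    (h : ∀ w ∈ PySem.List.pyRange a b 1, ¬ (w = 8 ∨ w = 18)) :
    (PySem.List.pyRange a b 1).foldl
      (fun acc w => if ¬ (w = 8 ∨ w = 18) then acc + 1 else acc) 0
      = ((b - a).toNat : Int) := by
  have h1 : (PySem.List.pyRange a b 1).foldl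
      (fun acc w => if ¬ (w = 8 ∨ w = 18) then acc + 1 else acc) (0 : Int)
      = (PySem.List.pyRange a b 1).foldl (fun acc (_ : Int) => acc + 1) (0 : Int) := by
    apply PySem.List.foldl_congr_mem
    intro acc w hw
    simp [h w hw]
  refine h1.trans ?_
  rw [pv_foldl_count_const, PySem.List.length_pyRange_one]
  simp

-- ===== VERDICT =====
theorem weeks_until_next_exam_py_spec : Claim_equal_weeks_until_next_exam_py := by
  intro sem_week _
  unfold Spec_weeks_until_next_exam_py weeks_until_next_exam_py weeks_until_next_exam_py_alt
  by_cases h1 : sem_week < 8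
  · have e8 : decide (sem_week < 8) = true := by simp [h1]
    have e18 : decide (sem_week < 18) = true := by simp; omega
    have e19 : decide (sem_week < 18 + 1) = true := by simp; omega
    simp only [if_pos h1, List.filter, e8, e18, e19, PySem.List.min?_id_cons]
    rw [pv_count_all]
    · simp [List.foldl]; omega
    · intro w hw
      rw [PySem.List.mem_pyRange_one] at hw
      omega
  · by_cases h2 : sem_week < 18
    · have e8 : decide (sem_week < 8) = false := by simp; omega
      have e18 : decide (sem_week < 18) = true := by simp [h2]
      have e19 : decide (sem_week < 18 + 1) = true := by simp; omega
      simp only [if_neg h1, if_pos h2, List.filter, e8, e18, e19, PySem.List.min?_id_cons]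
      rw [pv_count_all]
      · simp [List.foldl]; omega
      · intro w hw
        rw [PySem.List.mem_pyRange_one] at hw
        omega
    · by_cases h3 : sem_week < 19
      · have e8 : decide (sem_week < 8) = false := by simp; omega
        have e18 : decide (sem_week < 18) = false := by simp; omega
        have e19 : decide (sem_week < 18 + 1) = true := by simp; omega
        simp only [if_neg h1, if_neg h2, List.filter, e8, e18, e19, PySem.List.min?_id_cons]
        rw [pv_count_all]
        · simp [List.foldl]; omega
        · intro w hw
          rw [PySem.List.mem_pyRange_one] at hw
          omega
      · have e8 : decide (sem_week < 8) = false := by simp; omega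
        have e18 : decide (sem_week < 18) = false := by simp; omega
        have e19 : decide (sem_week < 18 + 1) = false := by simp; omega
        simp only [if_neg h1, if_neg h2, List.filter, e8, e18, e19]
        rw [pv_count_all]
        · simp [PySem.List.min?]; omega
        · intro w hw
          rw [PySem.List.mem_pyRange_one] at hw
          omega
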